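-- pv_equiv track=rewrite | github.com/TheScriptGuy/getCertificateChain | CertificateManager.py | _normalize_subject
-- ===== SOURCE A (Python) =====
-- def _normalize_subject(subject: str) -> str:
--     """Normalize the subject name to use for file name purposes."""
--     normalizedName = subject.split(',')
--     # Initialize commonName with None to check later if it was set
--     commonName = None
--     # Iterate through all the elements of normalizedName, finding the CN= one.
--     for item in normalizedName:
--         prefix = item[:3]
--         if prefix in ("CN=", "OU="):
--             itemIndex = item.find('=')
--             commonName = item[itemIndex+1:]
--             break
--         elif not commonName:  # This will catch the first item if no CN= or OU= is found
--             itemIndex = item.find('=')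
--             commonName = item[itemIndex+1:]
--
--     # Replace spaces with hyphens
--     commonName = commonName.replace(' ', '-')
--
--     # Remove wildcards
--     commonName = commonName.replace('*.', '')
--
--     # Make sure the filename string is lower case
--     new_normalized_name = ''.join(commonName).lower()
--
--     # Ensure we return a string even if commonName remains None
--     return new_normalized_name if new_normalized_name is not None else ""
-- ===== SOURCE B (Python) =====
-- def _normalize_subject(subject: str) -> str:
--     """Normalize the subject name to use for file name purposes."""
--     parts = subject.split(',')
--     # First CN=/OU= part wins; otherwise the first part with a non-empty
--     # value after its first '='; otherwise ''.
--     value = next((item[item.find('=') + 1:] for item in parts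
--                   if item[:3] in ('CN=', 'OU=')), None)
--     if value is None:
--         value = next((item[item.find('=') + 1:] for item in parts
--                       if item[item.find('=') + 1:]), '')
--     return value.replace(' ', '-').replace('*.', '').lower()
-- ===== Notes on version B (the rewrite author's own statement) =====
-- stated objective: idiomatic
-- what changed: Replaces the stateful loop with its break/elif re-assignment logic by two declarative next() searches: first the first CN=/OU= part, then (only if none) the first part with a non-empty value after its first equals sign, then the shared transforms.
import Mathlib
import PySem

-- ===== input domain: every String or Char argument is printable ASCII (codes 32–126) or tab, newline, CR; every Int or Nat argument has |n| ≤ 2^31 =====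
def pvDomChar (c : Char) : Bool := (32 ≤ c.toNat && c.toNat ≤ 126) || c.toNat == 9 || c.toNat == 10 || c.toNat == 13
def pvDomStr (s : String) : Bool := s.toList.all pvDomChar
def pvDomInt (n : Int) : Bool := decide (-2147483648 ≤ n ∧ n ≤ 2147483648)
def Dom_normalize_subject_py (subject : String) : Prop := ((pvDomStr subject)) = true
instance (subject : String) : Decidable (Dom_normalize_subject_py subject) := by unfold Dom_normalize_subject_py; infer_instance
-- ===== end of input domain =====

-- B replaces A's stateful break/elif loop by two declarative first-match searches (idiomatic; same cost).

-- item[item.find('=')+1:]  (shared literal expression of both Pythons)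
def pvVal (item : String) : String :=
  PySem.Str.slice item (some (PySem.Str.find item "=" + 1)) none

-- ===== PORT A =====
-- A's for-loop with break: recursion carrying commonName (None → Option.none; 'not commonName' is None-or-empty)
def pvLoopA : List String → Option String → Option String
  | [], cn => cn
  | item :: rest, cn =>
    if PySem.Str.slice item none (some 3) = "CN=" ∨ PySem.Str.slice item none (some 3) = "OU=" then
      some (pvVal item)           -- break
    else if cn = none ∨ cn = some "" then
      pvLoopA rest (some (pvVal item))
    else
      pvLoopA rest cn

def normalize_subject_py (subject : String) : String :=
  -- sep "," ≠ "", so split? never returns none; .getD [] is unreachable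
  let normalizedName := (PySem.Str.split? subject ",").getD []
  -- split(',') is never empty, so the loop never leaves commonName = None; .getD "" is unreachable
  let commonName := (pvLoopA normalizedName none).getD ""
  let commonName := PySem.Str.replace commonName " " "-"
  let commonName := PySem.Str.replace commonName "*." ""
  -- ''.join(commonName) over a str is the identity on the string
  PySem.Str.lower commonName

-- ===== PORT B =====
-- next(gen, default): first element of the generator, via List.findSome?
def pvFindCN (parts : List String) : Option String :=
  parts.findSome? (fun item =>
    if PySem.Str.slice item none (some 3) = "CN=" ∨ PySem.Str.slice item none (some 3) = "OU=" then
      some (pvVal item) else none)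

def pvFindNonEmpty (parts : List String) : Option String :=
  parts.findSome? (fun item => if pvVal item ≠ "" then some (pvVal item) else none)

def normalize_subject_py_alt (subject : String) : String :=
  let parts := (PySem.Str.split? subject ",").getD []
  let value :=
    match pvFindCN parts with
    | some v => v
    | none => (pvFindNonEmpty parts).getD ""
  PySem.Str.lower (PySem.Str.replace (PySem.Str.replace value " " "-") "*." "")

-- ===== PRECONDITION & SPEC =====
def Spec_normalize_subject_py (subject : String) (out : String) : Prop := out = normalize_subject_py_alt subject
instance (subject : String) (out : String) : Decidable (Spec_normalize_subject_py subject out) := by unfold Spec_normalize_subject_py; infer_instance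

-- ===== CLAIM (what is proved, stated in full; the proofs are below) =====
def Claim_equal_normalize_subject_py : Prop := ∀ (subject : String), Dom_normalize_subject_py subject → Spec_normalize_subject_py subject (normalize_subject_py subject)

-- ===== LEMMAS AND PROOFS =====

-- Once commonName is non-empty A's elif never fires again; only a later CN=/OU= (break) can change it.
theorem pvLoopA_truthy (parts : List String) (v : String) (hv : v ≠ "") :
    pvLoopA parts (some v) = (pvFindCN parts).or (some v) := by
  induction parts with
  | nil => simp [pvLoopA, pvFindCN]
  | cons item rest ih =>
    by_cases h : PySem.Str.slice item none (some 3) = "CN=" ∨ PySem.Str.slice item none (some 3) = "OU="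
    · simp [pvLoopA, pvFindCN, h]
    · have hne : ¬ ((some v : Option String) = none ∨ some v = some "") := by simp [hv]
      simp only [pvLoopA, if_neg h, if_neg hne, ih]
      simp [pvFindCN, h]

-- With a falsy accumulator A's loop yields the first CN=/OU= value, else the first non-empty value, else "".
theorem pvLoopA_falsy (parts : List String) (acc : Option String)
    (hacc : acc = none ∨ acc = some "") :
    (pvLoopA parts acc).getD "" = ((pvFindCN parts).or (pvFindNonEmpty parts)).getD "" := by
  induction parts generalizing acc with
  | nil =>
    rcases hacc with h | h <;> simp [pvLoopA, pvFindCN, pvFindNonEmpty, h]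
  | cons item rest ih =>
    by_cases h : PySem.Str.slice item none (some 3) = "CN=" ∨ PySem.Str.slice item none (some 3) = "OU="
    · simp [pvLoopA, pvFindCN, h]
    · by_cases hv : pvVal item = ""
      · rw [show pvLoopA (item :: rest) acc = pvLoopA rest (some "") from by
          rcases hacc with h1 | h1 <;> simp [pvLoopA, h, h1, hv]]
        rw [ih (some "") (Or.inr rfl)]
        simp [pvFindCN, pvFindNonEmpty, h, hv]
      · rw [show pvLoopA (item :: rest) acc = pvLoopA rest (some (pvVal item)) from by
          rcases hacc with h1 | h1 <;> simp [pvLoopA, h, h1]]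
        rw [pvLoopA_truthy rest (pvVal item) hv]
        simp [pvFindCN, pvFindNonEmpty, h, hv]

-- ===== VERDICT (by name: the statement is the Claim_ definition above) =====
theorem normalize_subject_py_spec : Claim_equal_normalize_subject_py := by
  intro subject _
  unfold Spec_normalize_subject_py normalize_subject_py normalize_subject_py_alt
  dsimp only
  rw [pvLoopA_falsy ((PySem.Str.split? subject ",").getD []) none (Or.inl rfl)]
  cases pvFindCN ((PySem.Str.split? subject ",").getD []) <;> simp
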